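-- pv_equiv track=rewrite | github.com/zdx3578/popper-arc | oldcodeforref/arcMrule/popper/grid_extension_plugin_integration.py | apply_solution
-- ===== SOURCE A (Python) =====
-- def apply_solution(input_grid, learned_rules=None):
--     """应用网格扩展解决方案"""
--     # 创建输出网格
--     output_grid = [row[:] for row in input_grid]
--     height, width = len(input_grid), len(input_grid[0])
--
--     # 1. 提取网格线位置
--     h_lines = []
--     v_lines = []
--     yellow_positions = []
--
--     for y in range(height):
--         if 6 in input_grid[y]:
--             h_lines.append(y)
--
--     for x in range(width):
--         if 6 in [input_grid[y][x] for y in range(height)]: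
--             v_lines.append(x)
--
--     for y in range(height):
--         for x in range(width):
--             if input_grid[y][x] == 4:  # 黄色
--                 yellow_positions.append((x, y))
--
--     # 2. 创建完整网格
--     # 如果没有足够的线，添加更多
--     if len(h_lines) < 2:
--         h_spacing = height // 3
--         h_lines = [h_spacing, 2 * h_spacing]
--
--     if len(v_lines) < 2:
--         v_spacing = width // 3
--         v_lines = [v_spacing, 2 * v_spacing]
--
--     # 填充所有水平线
--     for y in h_lines:
--         for x in range(width):
--             output_grid[y][x] = 6  # 蓝色
--
--     # 填充所有垂直线
--     for x in v_lines:
--         for y in range(height):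
--             output_grid[y][x] = 6  # 蓝色
--
--     # 3. 垂直延伸黄色对象
--     yellow_columns = {x for x, _ in yellow_positions}
--
--     for x in yellow_columns:
--         # 查找包含此黄色对象的单元格
--         containing_cells = []
--
--         for i in range(len(h_lines) + 1):
--             top = 0 if i == 0 else h_lines[i-1] + 1
--             bottom = height - 1 if i == len(h_lines) else h_lines[i] - 1
--
--             for j in range(len(v_lines) + 1):
--                 left = 0 if j == 0 else v_lines[j-1] + 1
--                 right = width - 1 if j == len(v_lines) else v_lines[j] - 1
--
--                 # 检查该单元格是否包含黄色像素
--                 has_yellow = False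
--                 for y in range(top, bottom + 1):
--                     if left <= x <= right and input_grid[y][x] == 4:
--                         has_yellow = True
--                         break
--
--                 if has_yellow:
--                     # 填充整个单元格的黄色
--                     for y in range(top, bottom + 1):
--                         if output_grid[y][x] == 0:  # 只填充空白区域
--                             output_grid[y][x] = 4  # 黄色
--
--     # 4. 在交点处添加绿色
--     for x in v_lines:
--         for y in h_lines:
--             if output_grid[y][x] == 6:  # 蓝色交叉点
--                 # 检查周围是否有黄色
--                 has_adjacent_yellow = False
--                 for dx, dy in [(0, -1), (0, 1), (-1, 0), (1, 0)]:
--                     nx, ny = x + dx, y + dy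
--                     if 0 <= nx < width and 0 <= ny < height and output_grid[ny][nx] == 4:
--                         has_adjacent_yellow = True
--                         break
--
--                 # 如果有相邻黄色，将交点变为绿色
--                 if has_adjacent_yellow:
--                     output_grid[y][x] = 2  # 绿色
--
--     return output_grid
-- ===== SOURCE B (Python) =====
-- def apply_solution(input_grid, learned_rules=None):
--     """Grid-extension solution, rebuilt: direct row construction plus locate-band-then-fill."""
--     height, width = len(input_grid), len(input_grid[0])
--
--     # 1. grid-line rows/columns and yellow pixels (comprehensions over coordinates)
--     h_lines = [y for y in range(height) if any(input_grid[y][x] == 6 for x in range(width))]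
--     v_lines = [x for x in range(width) if any(input_grid[y][x] == 6 for y in range(height))]
--     yellow_positions = [(x, y) for y in range(height) for x in range(width)
--                         if input_grid[y][x] == 4]
--
--     # 2. fall back to evenly spaced lines when fewer than two were found
--     if len(h_lines) < 2:
--         s = height // 3
--         h_lines = [s, 2 * s]
--     if len(v_lines) < 2:
--         s = width // 3
--         v_lines = [s, 2 * s]
--
--     # build the lined grid directly instead of copying and mutating
--     output_grid = [[6] * width if y in h_lines
--                    else [6 if x in v_lines else input_grid[y][x] for x in range(width)]
--                    for y in range(height)]
--
--     # 3. for each yellow pixel, locate its band between the h-lines and fill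
--     #    that column segment (columns on a v-line belong to no cell)
--     for x, y in yellow_positions:
--         if x in v_lines or y in h_lines:
--             continue
--         top, bottom = 0, height - 1
--         for h in h_lines:
--             if h < y:
--                 top = max(top, h + 1)
--             else:
--                 bottom = min(bottom, h - 1)
--         for r in range(top, bottom + 1):
--             if output_grid[r][x] == 0:
--                 output_grid[r][x] = 4
--
--     # 4. green at intersections adjacent to yellow
--     for x in v_lines:
--         for y in h_lines:
--             if output_grid[y][x] == 6 and any(
--                     output_grid[y + dy][x + dx] == 4
--                     for dx, dy in ((0, -1), (0, 1), (-1, 0), (1, 0))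
--                     if 0 <= x + dx < width and 0 <= y + dy < height):
--                 output_grid[y][x] = 2
--
--     return output_grid
-- ===== Notes on version B (the rewrite author's own statement) =====
-- stated objective: alternative
-- what changed: Phase 3 now locates each yellow pixel's own band between the horizontal lines (max/min scan over h_lines) and fills just that column segment, instead of scanning every (h-band, v-band) cell pair per yellow column with a membership test; the lined grid is built row-by-row directly instead of copy-then-mutate, and grid lines are found by comprehensions.
-- outside the precondition, e.g. on apply_solution([[0, 4], [0, 0, 6]], None): A returns [[6, 6], [6, 0, 6]], B returns [[6, 6], [6, 0]]
import Mathlib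
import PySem

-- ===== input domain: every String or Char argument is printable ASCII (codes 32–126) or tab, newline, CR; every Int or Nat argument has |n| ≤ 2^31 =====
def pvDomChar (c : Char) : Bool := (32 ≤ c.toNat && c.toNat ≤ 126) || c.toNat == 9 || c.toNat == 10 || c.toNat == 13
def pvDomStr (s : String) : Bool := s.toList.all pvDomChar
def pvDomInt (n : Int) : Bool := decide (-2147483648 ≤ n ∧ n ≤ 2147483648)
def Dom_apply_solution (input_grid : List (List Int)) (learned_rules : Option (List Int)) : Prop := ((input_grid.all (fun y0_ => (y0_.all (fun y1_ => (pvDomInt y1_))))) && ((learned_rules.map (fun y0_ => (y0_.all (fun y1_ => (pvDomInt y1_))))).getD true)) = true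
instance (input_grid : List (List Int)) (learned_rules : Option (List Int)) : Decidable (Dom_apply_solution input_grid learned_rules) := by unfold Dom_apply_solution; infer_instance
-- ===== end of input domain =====

-- B rebuilds the lined grid directly and fills each yellow pixel's own band instead of
-- scanning every (h-band, v-band) cell pair per yellow column; equivalence is proved on
-- nonempty rectangular grids (the function's natural domain).

-- shared Python-indexing helpers: grid[y][x] read (default 0) and write (in-range write, as both ports use them)
def pvGet (g : List (List Int)) (y x : Int) : Int :=
  PySem.List.pyGetD (PySem.List.pyGetD g y []) x 0

def pvSet (g : List (List Int)) (y x v : Int) : List (List Int) :=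
  PySem.List.pySetD g y (PySem.List.pySetD (PySem.List.pyGetD g y []) x v)

-- 'for r in range(top, bottom+1): if output_grid[r][x] == 0: output_grid[r][x] = 4' (this loop appears verbatim in both Pythons)
def pvFill (g : List (List Int)) (x t b : Int) : List (List Int) :=
  (PySem.List.pyRange t (b + 1) 1).foldl (fun g r => if pvGet g r x = 0 then pvSet g r x 4 else g) g

-- ===== PORT A =====
def apply_solution (input_grid : List (List Int)) (learned_rules : Option (List Int)) : List (List Int) :=
  let output_grid := input_grid.map (fun row => PySem.List.slice row none none)
  let height : Int := PySem.List.len input_grid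
  let width : Int := PySem.List.len (PySem.List.pyGetD input_grid 0 [])
  let h_lines : List Int := (PySem.List.pyRange 0 height 1).foldl (fun acc y =>
      if (PySem.List.pyGetD input_grid y []).contains 6 then acc ++ [y] else acc) []
  let v_lines : List Int := (PySem.List.pyRange 0 width 1).foldl (fun acc x =>
      if ((PySem.List.pyRange 0 height 1).map (fun y => pvGet input_grid y x)).contains 6 then acc ++ [x] else acc) []
  let yellow_positions : List (Int × Int) := (PySem.List.pyRange 0 height 1).foldl (fun acc y =>
      (PySem.List.pyRange 0 width 1).foldl (fun acc x =>
        if pvGet input_grid y x = 4 then acc ++ [(x, y)] else acc) acc) []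
  let h_lines := if PySem.List.len h_lines < 2 then
      [PySem.Int.floordiv height 3, 2 * PySem.Int.floordiv height 3] else h_lines
  let v_lines := if PySem.List.len v_lines < 2 then
      [PySem.Int.floordiv width 3, 2 * PySem.Int.floordiv width 3] else v_lines
  let output_grid := h_lines.foldl (fun g y =>
      (PySem.List.pyRange 0 width 1).foldl (fun g x => pvSet g y x 6) g) output_grid
  let output_grid := v_lines.foldl (fun g x =>
      (PySem.List.pyRange 0 height 1).foldl (fun g y => pvSet g y x 6) g) output_grid
  let yellow_columns : List Int := PySem.Set.ofList (yellow_positions.map (fun p => p.1))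
  let output_grid := yellow_columns.foldl (fun g x =>
      (PySem.List.pyRange 0 (PySem.List.len h_lines + 1) 1).foldl (fun g i =>
        let top := if i = 0 then 0 else PySem.List.pyGetD h_lines (i - 1) 0 + 1
        let bottom := if i = PySem.List.len h_lines then height - 1 else PySem.List.pyGetD h_lines i 0 - 1
        (PySem.List.pyRange 0 (PySem.List.len v_lines + 1) 1).foldl (fun g j =>
          let left := if j = 0 then 0 else PySem.List.pyGetD v_lines (j - 1) 0 + 1
          let right := if j = PySem.List.len v_lines then width - 1 else PySem.List.pyGetD v_lines j 0 - 1
          let has_yellow := (PySem.List.pyRange top (bottom + 1) 1).any (fun y =>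
              decide (left ≤ x ∧ x ≤ right ∧ pvGet input_grid y x = 4))
          if has_yellow then pvFill g x top bottom else g) g) g) output_grid
  let output_grid := v_lines.foldl (fun g x =>
      h_lines.foldl (fun g y =>
        if pvGet g y x = 6 then
          let has_adjacent_yellow := [((0:Int), (-1:Int)), (0, 1), (-1, 0), (1, 0)].foldl (fun flag d =>
              if 0 ≤ x + d.1 ∧ x + d.1 < width ∧ 0 ≤ y + d.2 ∧ y + d.2 < height ∧ pvGet g (y + d.2) (x + d.1) = 4
              then true else flag) false
          if has_adjacent_yellow then pvSet g y x 2 else g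
        else g) g) output_grid
  output_grid

-- ===== PORT B =====
def apply_solution_alt (input_grid : List (List Int)) (learned_rules : Option (List Int)) : List (List Int) :=
  let height : Int := PySem.List.len input_grid
  let width : Int := PySem.List.len (PySem.List.pyGetD input_grid 0 [])
  let h_lines : List Int := (PySem.List.pyRange 0 height 1).filter (fun y =>
      (PySem.List.pyRange 0 width 1).any (fun x => decide (pvGet input_grid y x = 6)))
  let v_lines : List Int := (PySem.List.pyRange 0 width 1).filter (fun x =>
      (PySem.List.pyRange 0 height 1).any (fun y => decide (pvGet input_grid y x = 6)))
  let yellow_positions : List (Int × Int) := (PySem.List.pyRange 0 height 1).flatMap (fun y =>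
      ((PySem.List.pyRange 0 width 1).filter (fun x => decide (pvGet input_grid y x = 4))).map (fun x => (x, y)))
  let h_lines := if PySem.List.len h_lines < 2 then
      [PySem.Int.floordiv height 3, 2 * PySem.Int.floordiv height 3] else h_lines
  let v_lines := if PySem.List.len v_lines < 2 then
      [PySem.Int.floordiv width 3, 2 * PySem.Int.floordiv width 3] else v_lines
  let output_grid := (PySem.List.pyRange 0 height 1).map (fun y =>
      if y ∈ h_lines then List.replicate width.toNat 6
      else (PySem.List.pyRange 0 width 1).map (fun x => if x ∈ v_lines then 6 else pvGet input_grid y x))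
  let output_grid := yellow_positions.foldl (fun g p =>
      if p.1 ∈ v_lines ∨ p.2 ∈ h_lines then g
      else
        let tb := h_lines.foldl (fun tb h =>
            if h < p.2 then (max tb.1 (h + 1), tb.2) else (tb.1, min tb.2 (h - 1))) ((0 : Int), height - 1)
        pvFill g p.1 tb.1 tb.2) output_grid
  let output_grid := v_lines.foldl (fun g x =>
      h_lines.foldl (fun g y =>
        if pvGet g y x = 6 ∧ [((0:Int), (-1:Int)), (0, 1), (-1, 0), (1, 0)].any (fun d =>
            decide (0 ≤ x + d.1 ∧ x + d.1 < width ∧ 0 ≤ y + d.2 ∧ y + d.2 < height ∧ pvGet g (y + d.2) (x + d.1) = 4))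
        then pvSet g y x 2 else g) g) output_grid
  output_grid

-- ===== PRECONDITION & SPEC =====
-- Pre_ restricts to nonempty rectangular grids with at least one column — the function's
-- natural domain: A raises IndexError on the empty grid, an empty first row or any row
-- shorter than the first, and on ragged grids with longer rows it merely carries the
-- trailing cells along untouched (a malformed-grid accident we do not model).
def Pre_apply_solution (input_grid : List (List Int)) (learned_rules : Option (List Int)) : Prop :=
  input_grid ≠ [] ∧ 0 < (input_grid.headD []).length ∧
    ∀ row ∈ input_grid, row.length = (input_grid.headD []).length
instance (input_grid : List (List Int)) (learned_rules : Option (List Int)) : Decidable (Pre_apply_solution input_grid learned_rules) := by unfold Pre_apply_solution; infer_instance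

def pvWitness_apply_solution : List (List Int) × Option (List Int) := ([[4, 0, 0], [0, 0, 6], [0, 0, 0]], none)

def Spec_apply_solution (input_grid : List (List Int)) (learned_rules : Option (List Int)) (out : List (List Int)) : Prop := out = apply_solution_alt input_grid learned_rules
instance (input_grid : List (List Int)) (learned_rules : Option (List Int)) (out : List (List Int)) : Decidable (Spec_apply_solution input_grid learned_rules out) := by unfold Spec_apply_solution; infer_instance

-- ===== CLAIM (what is proved, stated in full; the proofs are below) =====
def Claim_equal_apply_solution : Prop := ∀ (input_grid : List (List Int)) (learned_rules : Option (List Int)), Dom_apply_solution input_grid learned_rules → Pre_apply_solution input_grid learned_rules → Spec_apply_solution input_grid learned_rules (apply_solution input_grid learned_rules)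

-- ===== LEMMAS AND PROOFS =====

def pvRect (g : List (List Int)) (H W : Nat) : Prop := g.length = H ∧ ∀ row ∈ g, row.length = W

def pvCell (g : List (List Int)) (r c : Nat) : Int := (g.getD r []).getD c 0

theorem pvGet_natCast (g : List (List Int)) (r c : Nat) : pvGet g r c = pvCell g r c := by
  simp [pvGet, pvCell]

theorem pvGet_nonneg (g : List (List Int)) {y x : Int} (hy : 0 ≤ y) (hx : 0 ≤ x) :
    pvGet g y x = pvCell g y.toNat x.toNat := by
  simp [pvGet, pvCell, PySem.List.pyGetD_of_nonneg _ _ hy, PySem.List.pyGetD_of_nonneg _ _ hx]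

theorem pvCell_eq_getElem (g : List (List Int)) (r c : Nat) :
    ∀ (h1 : r < g.length) (h2 : c < (g[r]'h1).length), pvCell g r c = (g[r]'h1)[c]'h2 := by
  intro h1 h2
  simp [pvCell, List.getD_eq_getElem?_getD, List.getElem?_eq_getElem h1,
    List.getElem?_eq_getElem h2]

theorem pv_grid_ext {g₁ g₂ : List (List Int)} {H W : Nat} (h₁ : pvRect g₁ H W) (h₂ : pvRect g₂ H W)
    (h : ∀ r c, r < H → c < W → pvCell g₁ r c = pvCell g₂ r c) : g₁ = g₂ := by
  apply List.ext_getElem (by rw [h₁.1, h₂.1])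
  · intro r hr1 hr2
    apply List.ext_getElem
    · rw [h₁.2 _ (List.getElem_mem hr1), h₂.2 _ (List.getElem_mem hr2)]
    · intro c hc1 hc2
      have hr : r < H := by rw [← h₁.1]; exact hr1
      have hc : c < W := by
        have := h₁.2 _ (List.getElem_mem hr1); rw [← this]; exact hc1
      rw [← pvCell_eq_getElem g₁ r c, ← pvCell_eq_getElem g₂ r c]
      exact h r c hr hc

theorem pvRect_pvSet {g : List (List Int)} {H W : Nat} (hg : pvRect g H W) {y x : Int} (v : Int)
    (hy0 : 0 ≤ y) (hyH : y < H) (hx0 : 0 ≤ x) : pvRect (pvSet g y x v) H W := by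
  obtain ⟨hlen, hrow⟩ := hg
  have hyl : y.toNat < g.length := by omega
  constructor
  · simp [pvSet, PySem.List.pySetD_of_nonneg _ _ hy0, hlen]
  · intro row hmem
    simp only [pvSet, PySem.List.pySetD_of_nonneg _ _ hy0] at hmem
    rcases List.mem_or_eq_of_mem_set hmem with h | h
    · exact hrow _ h
    · subst h
      rw [PySem.List.pySetD_of_nonneg _ _ hx0, List.length_set,
        PySem.List.pyGetD_of_nonneg _ _ hy0, List.getD_eq_getElem _ _ hyl]
      exact hrow _ (List.getElem_mem hyl)

theorem pvCell_pvSet {g : List (List Int)} {H W : Nat} (hg : pvRect g H W) {y x : Int} (v : Int)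
    (hy : 0 ≤ y ∧ y < H) (hx : 0 ≤ x ∧ x < W) {r c : Nat} (hc : c < W) :
    pvCell (pvSet g y x v) r c = if (r : Int) = y ∧ (c : Int) = x then v else pvCell g r c := by
  have hglen := hg.1
  have hyl : y.toNat < g.length := by omega
  have hrowlen : (g.getD y.toNat []).length = W := by
    rw [List.getD_eq_getElem _ _ hyl]
    exact hg.2 _ (List.getElem_mem hyl)
  simp only [pvSet, PySem.List.pySetD_of_nonneg _ _ hy.1, PySem.List.pySetD_of_nonneg _ _ hx.1,
    PySem.List.pyGetD_of_nonneg _ _ hy.1, pvCell]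
  have houter : (g.set y.toNat ((g.getD y.toNat []).set x.toNat v)).getD r [] =
      if y.toNat = r then (g.getD y.toNat []).set x.toNat v else g.getD r [] := by
    rw [List.getD_eq_getElem?_getD, List.getElem?_set]
    split_ifs with h1
    · simp [hyl]
    · simp [List.getD_eq_getElem?_getD]
  rw [houter]
  by_cases hry : (r : Int) = y
  · have hyr : y.toNat = r := by omega
    rw [if_pos hyr, hyr]
    have hinner : ((g.getD r []).set x.toNat v).getD c 0 =
        if x.toNat = c then v else (g.getD r []).getD c 0 := by
      have hcl : c < (g.getD r []).length := by rw [hyr] at hrowlen; omega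
      rw [List.getD_eq_getElem?_getD, List.getElem?_set]
      split_ifs with h1 h2
      · simp
      · omega
      · simp [List.getD_eq_getElem?_getD]
    rw [hinner]
    by_cases hcx : (c : Int) = x
    · rw [if_pos (by omega), if_pos ⟨hry, hcx⟩]
    · rw [if_neg (by omega), if_neg (by tauto)]
  · rw [if_neg (by omega), if_neg (by tauto)]

theorem pvFill_eq_nil {g : List (List Int)} {x t b : Int} (h : b < t) : pvFill g x t b = g := by
  rw [pvFill, PySem.List.pyRange_one_eq_nil (by omega)]
  rfl

theorem pvFill_cons {g : List (List Int)} {x t b : Int} (h : t ≤ b) :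
    pvFill g x t b = pvFill (if pvGet g t x = 0 then pvSet g t x 4 else g) x (t + 1) b := by
  rw [pvFill, PySem.List.pyRange_one_cons (by omega), List.foldl_cons, pvFill]

theorem pvFill_char {H W : Nat} : ∀ (n : Nat) (g : List (List Int)) (x t b : Int),
    pvRect g H W → 0 ≤ x → x < W → 0 ≤ t → b < H → (b + 1 - t).toNat = n →
    pvRect (pvFill g x t b) H W ∧ ∀ r c : Nat, r < H → c < W →
      pvCell (pvFill g x t b) r c =
        if ((c : Int) = x ∧ t ≤ r ∧ (r : Int) ≤ b) ∧ pvCell g r c = 0 then 4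
        else pvCell g r c := by
  intro n
  induction n with
  | zero =>
    intro g x t b hg hx0 hxW ht0 hbH hn
    have hbt : b < t := by omega
    rw [pvFill_eq_nil hbt]
    refine ⟨hg, ?_⟩
    intro r c hr hc
    rw [if_neg]
    rintro ⟨⟨-, h1, h2⟩, -⟩
    omega
  | succ n ih =>
    intro g x t b hg hx0 hxW ht0 hbH hn
    have htb : t ≤ b := by omega
    set g' := if pvGet g t x = 0 then pvSet g t x 4 else g with hg'def
    have hg' : pvRect g' H W := by
      rw [hg'def]; split_ifs with h
      · exact pvRect_pvSet hg 4 ht0 (by omega) hx0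
      · exact hg
    have hcellg' : ∀ r c : Nat, r < H → c < W →
        pvCell g' r c = if ((r : Int) = t ∧ (c : Int) = x) ∧ pvCell g r c = 0 then 4
          else pvCell g r c := by
      intro r c hr hc
      rw [hg'def]
      have hget : pvGet g t x = pvCell g t.toNat x.toNat := pvGet_nonneg g ht0 hx0
      split_ifs with h1 h2 h2
      · rw [pvCell_pvSet hg 4 ⟨ht0, by omega⟩ ⟨hx0, hxW⟩ hc, if_pos ⟨h2.1.1, h2.1.2⟩]
      · rw [pvCell_pvSet hg 4 ⟨ht0, by omega⟩ ⟨hx0, hxW⟩ hc, if_neg]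
        intro hcon
        apply h2
        refine ⟨hcon, ?_⟩
        rw [hget] at h1
        have : t.toNat = r := by omega
        have : x.toNat = c := by omega
        rw [← ‹t.toNat = r›, ← ‹x.toNat = c›]
        exact h1
      · exfalso
        apply h1
        rw [hget]
        obtain ⟨⟨hrt, hcx⟩, h0⟩ := h2
        have : t.toNat = r := by omega
        have : x.toNat = c := by omega
        rw [‹t.toNat = r›, ‹x.toNat = c›]
        exact h0
      · rfl
    rw [pvFill_cons htb, ← hg'def]
    obtain ⟨hrect, hcell⟩ := ih g' x (t + 1) b hg' hx0 hxW (by omega) hbH (by omega)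
    refine ⟨hrect, ?_⟩
    intro r c hr hc
    rw [hcell r c hr hc, hcellg' r c hr hc]
    split_ifs <;> omega

def pvJobs (g : List (List Int)) (L : List (Int × Int × Int)) : List (List Int) :=
  L.foldl (fun g j => pvFill g j.1 j.2.1 j.2.2) g

theorem pvJobs_char {H W : Nat} : ∀ (L : List (Int × Int × Int)) (g : List (List Int)),
    pvRect g H W → (∀ j ∈ L, 0 ≤ j.1 ∧ j.1 < W ∧ 0 ≤ j.2.1 ∧ j.2.2 < H) →
    pvRect (pvJobs g L) H W ∧ ∀ r c : Nat, r < H → c < W →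
      pvCell (pvJobs g L) r c =
        if (∃ j ∈ L, (c : Int) = j.1 ∧ j.2.1 ≤ r ∧ (r : Int) ≤ j.2.2) ∧ pvCell g r c = 0 then 4
        else pvCell g r c := by
  intro L
  induction L with
  | nil =>
    intro g hg _
    refine ⟨hg, ?_⟩
    intro r c hr hc
    rw [if_neg (by rintro ⟨⟨j, hj, -⟩, -⟩; exact absurd hj (List.not_mem_nil))]
    rfl
  | cons j L ih =>
    intro g hg hL
    have hj := hL j List.mem_cons_self
    obtain ⟨hf_rect, hf_cell⟩ :=
      pvFill_char (H := H) (W := W) ((j.2.2 + 1 - j.2.1).toNat) g j.1 j.2.1 j.2.2 hg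
        hj.1 hj.2.1 hj.2.2.1 hj.2.2.2 rfl
    obtain ⟨hrect, hcell⟩ := ih (pvFill g j.1 j.2.1 j.2.2) hf_rect
      (fun j' hj' => hL j' (List.mem_cons_of_mem _ hj'))
    refine ⟨hrect, ?_⟩
    intro r c hr hc
    show pvCell (pvJobs (pvFill g j.1 j.2.1 j.2.2) L) r c = _
    rw [hcell r c hr hc, hf_cell r c hr hc]
    simp only [List.exists_mem_cons_iff]
    by_cases hC : (c : Int) = j.1 ∧ j.2.1 ≤ r ∧ (r : Int) ≤ j.2.2 <;>
      by_cases h0 : pvCell g r c = 0 <;>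
        by_cases hE : ∃ j' ∈ L, (c : Int) = j'.1 ∧ j'.2.1 ≤ r ∧ (r : Int) ≤ j'.2.2 <;>
          simp [hC, h0, hE]

theorem foldl_pvJobs_flat {α : Type} (l : List α) (J : α → List (Int × Int × Int)) :
    ∀ g : List (List Int), l.foldl (fun g a => pvJobs g (J a)) g = pvJobs g (l.flatMap J) := by
  induction l with
  | nil => intro g; rfl
  | cons a l ih =>
    intro g
    rw [List.foldl_cons, ih, List.flatMap_cons]
    show _ = List.foldl _ g (J a ++ List.flatMap J l)
    rw [List.foldl_append]
    rfl

def pvBands (lo : Int) (hs : List Int) (hi : Int) : List (Int × Int) :=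
  match hs with
  | [] => [(lo, hi)]
  | h :: hs => (lo, h - 1) :: pvBands (h + 1) hs hi

def pvTB (y : Int) (hs : List Int) (tb : Int × Int) : Int × Int :=
  hs.foldl (fun tb h => if h < y then (max tb.1 (h + 1), tb.2) else (tb.1, min tb.2 (h - 1))) tb

theorem pvBands_fst_le : ∀ (hs : List Int) (lo hi : Int), hs.Pairwise (· ≤ ·) →
    (∀ h ∈ hs, lo ≤ h + 1) → ∀ p ∈ pvBands lo hs hi, lo ≤ p.1 := by
  intro hs
  induction hs with
  | nil => intro lo hi _ _ p hp; simp [pvBands] at hp; subst hp; simp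
  | cons h hs ih =>
    intro lo hi hsort hlo p hp
    rcases List.mem_cons.mp hp with h1 | h1
    · subst h1; simp
    · have := ih (h + 1) hi (List.Pairwise.of_cons hsort)
        (fun h' hh' => by have := List.rel_of_pairwise_cons hsort hh'; omega) p h1
      have := hlo h List.mem_cons_self
      omega

theorem pvBands_snd_le : ∀ (hs : List Int) (lo hi : Int),
    (∀ h ∈ hs, h - 1 ≤ hi) → ∀ p ∈ pvBands lo hs hi, p.2 ≤ hi := by
  intro hs
  induction hs with
  | nil => intro lo hi _ p hp; simp [pvBands] at hp; subst hp; simp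
  | cons h hs ih =>
    intro lo hi hhi p hp
    rcases List.mem_cons.mp hp with h1 | h1
    · subst h1; simpa using hhi h List.mem_cons_self
    · exact ih (h + 1) hi (fun h' hh' => hhi h' (List.mem_cons_of_mem _ hh')) p h1

theorem pvTB_gt : ∀ (hs : List Int) (y t0 b0 : Int), hs.Pairwise (· ≤ ·) →
    (∀ h ∈ hs, y < h) → pvTB y hs (t0, b0) = (t0, min b0 (hs.headD (b0 + 1) - 1)) := by
  intro hs
  induction hs with
  | nil => intro y t0 b0 _ _; simp [pvTB]
  | cons h hs ih =>
    intro y t0 b0 hsort hall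
    have hy := hall h List.mem_cons_self
    show pvTB y hs (if h < y then _ else _) = _
    rw [if_neg (by omega)]
    rw [ih y t0 (min b0 (h - 1)) (List.Pairwise.of_cons hsort)
      (fun h' hh' => hall h' (List.mem_cons_of_mem _ hh'))]
    cases hs with
    | nil => simp
    | cons h' hs' =>
      have : h ≤ h' := List.rel_of_pairwise_cons hsort List.mem_cons_self
      simp only [List.headD_cons]
      congr 1
      omega

theorem pvBand_main : ∀ (hs : List Int) (lo hi y : Int), hs.Pairwise (· ≤ ·) →
    (∀ h ∈ hs, lo ≤ h + 1 ∧ h - 1 ≤ hi) → lo ≤ y → y ≤ hi → y ∉ hs →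
    (pvTB y hs (lo, hi)).1 ≤ y ∧ y ≤ (pvTB y hs (lo, hi)).2 ∧
    ∀ r : Int, (∃ p ∈ pvBands lo hs hi, p.1 ≤ y ∧ y ≤ p.2 ∧ p.1 ≤ r ∧ r ≤ p.2) ↔
      ((pvTB y hs (lo, hi)).1 ≤ r ∧ r ≤ (pvTB y hs (lo, hi)).2) := by
  intro hs
  induction hs with
  | nil =>
    intro lo hi y _ _ hlo hhi _
    refine ⟨hlo, hhi, ?_⟩
    intro r
    constructor
    · rintro ⟨p, hp, h⟩
      simp [pvBands] at hp
      subst hp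
      exact ⟨h.2.2.1, h.2.2.2⟩
    · intro h
      exact ⟨(lo, hi), by simp [pvBands], hlo, hhi, h.1, h.2⟩
  | cons h hs ih =>
    intro lo hi y hsort hbnd hlo hhi hnot
    have hbh := hbnd h List.mem_cons_self
    have hsort' := List.Pairwise.of_cons hsort
    have hrel : ∀ h' ∈ hs, h ≤ h' := fun h' hh' => List.rel_of_pairwise_cons hsort hh'
    have hyh : y ≠ h := fun hc => hnot (hc ▸ List.mem_cons_self)
    rcases lt_or_gt_of_ne hyh with hylt | hygt
    · -- y < h : y lives in the first band (lo, h-1)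
      have hstep : pvTB y (h :: hs) (lo, hi) = (lo, min hi (h - 1)) := by
        show pvTB y hs (if h < y then _ else _) = _
        rw [if_neg (by omega)]
        rw [pvTB_gt hs y lo (min hi (h - 1)) hsort' (fun h' hh' => by have := hrel h' hh'; omega)]
        cases hs with
        | nil => simp
        | cons h' hs' =>
          have := hrel h' List.mem_cons_self
          simp only [List.headD_cons]
          congr 1
          omega
      rw [hstep]
      have hmin : min hi (h - 1) = h - 1 := by omega
      rw [hmin]
      refine ⟨hlo, by omega, ?_⟩
      intro r
      constructor
      · rintro ⟨p, hp, hc⟩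
        rcases List.mem_cons.mp hp with h1 | h1
        · subst h1
          exact ⟨hc.2.2.1, hc.2.2.2⟩
        · exfalso
          have := pvBands_fst_le hs (h + 1) hi hsort'
            (fun h' hh' => by have := hrel h' hh'; omega) p h1
          omega
      · intro hr
        exact ⟨(lo, h - 1), List.mem_cons_self, by omega, by omega, hr.1, hr.2⟩
    · -- y > h : recurse into the remaining bands
      have hstep : pvTB y (h :: hs) (lo, hi) = pvTB y hs (h + 1, hi) := by
        show pvTB y hs (if h < y then _ else _) = _
        rw [if_pos (by omega)]
        congr 2
        omega
      have hih := ih (h + 1) hi y hsort'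
        (fun h' hh' => ⟨by have := hrel h' hh'; omega, (hbnd h' (List.mem_cons_of_mem _ hh')).2⟩)
        (by omega) hhi (fun hc => hnot (List.mem_cons_of_mem _ hc))
      rw [hstep]
      refine ⟨hih.1, hih.2.1, ?_⟩
      intro r
      rw [← hih.2.2 r]
      constructor
      · rintro ⟨p, hp, hc⟩
        rcases List.mem_cons.mp hp with h1 | h1
        · exfalso; subst h1; simp at hc; omega
        · exact ⟨p, h1, hc⟩
      · rintro ⟨p, hp, hc⟩
        exact ⟨p, List.mem_cons_of_mem _ hp, hc⟩

theorem pvBands_not_cover : ∀ (hs : List Int) (lo hi x : Int), hs.Pairwise (· ≤ ·) →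
    x ∈ hs → ∀ p ∈ pvBands lo hs hi, ¬(p.1 ≤ x ∧ x ≤ p.2) := by
  intro hs
  induction hs with
  | nil => intro lo hi x _ hx; exact absurd hx List.not_mem_nil
  | cons h hs ih =>
    intro lo hi x hsort hx p hp
    have hsort' := List.Pairwise.of_cons hsort
    have hrel : ∀ h' ∈ hs, h ≤ h' := fun h' hh' => List.rel_of_pairwise_cons hsort hh'
    have hxh : h ≤ x := by
      rcases List.mem_cons.mp hx with h1 | h1
      · omega
      · have := hrel x h1; omega
    rcases List.mem_cons.mp hp with h1 | h1
    · subst h1; simp; omega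
    · rcases List.mem_cons.mp hx with h2 | h2
      · subst h2
        have := pvBands_fst_le hs (x + 1) hi hsort'
          (fun h' hh' => by have := hrel h' hh'; omega) p h1
        omega
      · exact ih (h + 1) hi x hsort' h2 p h1

theorem pvRangeBands : ∀ (hs : List Int) (lo hi : Int),
    (PySem.List.pyRange 0 (PySem.List.len hs + 1) 1).map (fun i =>
      (if i = 0 then lo else PySem.List.pyGetD hs (i - 1) 0 + 1,
       if i = PySem.List.len hs then hi else PySem.List.pyGetD hs i 0 - 1)) = pvBands lo hs hi := by
  intro hs
  induction hs with
  | nil =>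
    intro lo hi
    have h1 : PySem.List.pyRange 0 (PySem.List.len ([] : List Int) + 1) 1 = [(0 : Int)] := by rfl
    rw [h1, List.map_cons, List.map_nil, pvBands]
    simp [PySem.List.len_eq]
  | cons h hs ih =>
    intro lo hi
    have hlen : PySem.List.len (h :: hs) + 1 = ((hs.length + 2 : Nat) : Int) := by
      rw [PySem.List.len_eq, List.length_cons]; push_cast; ring
    rw [hlen, PySem.List.pyRange_zero_nat, List.range_succ_eq_map, List.map_cons, List.map_cons]
    simp only [List.map_map, Function.comp_def]
    rw [show pvBands lo (h :: hs) hi = (lo, h - 1) :: pvBands (h + 1) hs hi from rfl]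
    congr 1
    · rw [if_pos (by norm_num), if_neg (by rw [PySem.List.len_eq, List.length_cons]; push_cast; omega)]
      norm_num [PySem.List.pyGetD_zero]
    · rw [← ih (h + 1) hi,
        show PySem.List.len hs + 1 = ((hs.length + 1 : Nat) : Int) by
          rw [PySem.List.len_eq]; push_cast; ring,
        PySem.List.pyRange_zero_nat, List.map_map, Function.comp_def]
      apply List.map_congr_left
      intro k hk
      have hklt : k < hs.length + 1 := List.mem_range.mp hk
      simp only [Nat.succ_eq_add_one]
      congr 1
      · cases k with
        | zero =>
          norm_num [PySem.List.pyGetD_zero]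
        | succ k' =>
          have e1 : ((k' + 1 + 1 : Nat) : Int) ≠ 0 := by omega
          have e2 : ((k' + 1 : Nat) : Int) ≠ 0 := by omega
          rw [if_neg e1, if_neg e2]
          rw [show ((k' + 1 + 1 : Nat) : Int) - 1 = (((k' + 1 : Nat)) : Int) by omega,
            show (((k' + 1 : Nat)) : Int) - 1 = ((k' : Nat) : Int) by omega,
            PySem.List.pyGetD_natCast, PySem.List.pyGetD_natCast]
          simp
      · have hc : ((k + 1 : Nat) : Int) = PySem.List.len (h :: hs) ↔
            ((k : Nat) : Int) = PySem.List.len hs := by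
          rw [PySem.List.len_eq, PySem.List.len_eq, List.length_cons]; push_cast; omega
        by_cases hke : ((k : Nat) : Int) = PySem.List.len hs
        · rw [if_pos (hc.mpr hke), if_pos hke]
        · rw [if_neg (fun hx => hke (hc.mp hx)), if_neg hke,
            PySem.List.pyGetD_natCast, PySem.List.pyGetD_natCast]
          simp

theorem pvRowFill_char {H W : Nat} : ∀ (n : Nat) (g : List (List Int)) (y : Int),
    pvRect g H W → 0 ≤ y → y < H → n ≤ W →
    pvRect ((PySem.List.pyRange 0 (n : Int) 1).foldl (fun g x => pvSet g y x 6) g) H W ∧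
    ∀ r c : Nat, r < H → c < W →
      pvCell ((PySem.List.pyRange 0 (n : Int) 1).foldl (fun g x => pvSet g y x 6) g) r c =
        if (r : Int) = y ∧ c < n then 6 else pvCell g r c := by
  intro n
  induction n with
  | zero =>
    intro g y hg hy0 hyH _
    rw [show ((0 : Nat) : Int) = 0 by norm_num, PySem.List.pyRange_one_eq_nil (by omega)]
    exact ⟨hg, fun r c hr hc => by rw [if_neg (by omega)]; rfl⟩
  | succ n ih =>
    intro g y hg hy0 hyH hnW
    obtain ⟨hrect, hcell⟩ := ih g y hg hy0 hyH (by omega)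
    have hsplit : PySem.List.pyRange 0 ((n + 1 : Nat) : Int) 1 =
        PySem.List.pyRange 0 (n : Int) 1 ++ [(n : Int)] := by
      rw [show ((n + 1 : Nat) : Int) = (n : Int) + 1 by push_cast; ring]
      exact PySem.List.pyRange_one_succ_right (by positivity)
    rw [hsplit, List.foldl_append]
    simp only [List.foldl_cons, List.foldl_nil]
    refine ⟨pvRect_pvSet hrect 6 hy0 (by omega) (by positivity), ?_⟩
    intro r c hr hc
    rw [pvCell_pvSet hrect 6 ⟨hy0, hyH⟩ ⟨by positivity, by omega⟩ hc,
      hcell r c hr hc]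
    split_ifs <;> omega

theorem pvHFill_char {H W : Nat} : ∀ (hl : List Int) (g : List (List Int)),
    pvRect g H W → (∀ h ∈ hl, 0 ≤ h ∧ h < H) →
    pvRect (hl.foldl (fun g y => (PySem.List.pyRange 0 (W : Int) 1).foldl (fun g x => pvSet g y x 6) g) g) H W ∧
    ∀ r c : Nat, r < H → c < W →
      pvCell (hl.foldl (fun g y => (PySem.List.pyRange 0 (W : Int) 1).foldl (fun g x => pvSet g y x 6) g) g) r c =
        if (r : Int) ∈ hl then 6 else pvCell g r c := by
  intro hl
  induction hl with
  | nil =>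
    intro g hg _
    exact ⟨hg, fun r c hr hc => by rw [if_neg List.not_mem_nil]; rfl⟩
  | cons h hl ih =>
    intro g hg hbnd
    have hh := hbnd h List.mem_cons_self
    obtain ⟨hrect1, hcell1⟩ := pvRowFill_char W g h hg hh.1 hh.2 le_rfl
    obtain ⟨hrect, hcell⟩ := ih _ hrect1 (fun h' hh' => hbnd h' (List.mem_cons_of_mem _ hh'))
    refine ⟨hrect, ?_⟩
    intro r c hr hc
    rw [List.foldl_cons, hcell r c hr hc, hcell1 r c hr hc]
    by_cases h1 : (r : Int) ∈ hl
    · rw [if_pos h1, if_pos (List.mem_cons_of_mem _ h1)]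
    · rw [if_neg h1]
      by_cases h2 : (r : Int) = h
      · rw [if_pos ⟨h2, hc⟩, if_pos (by rw [h2]; exact List.mem_cons_self)]
      · rw [if_neg (by tauto), if_neg (by rw [List.mem_cons]; tauto)]

theorem pvColFill_char {H W : Nat} : ∀ (n : Nat) (g : List (List Int)) (x : Int),
    pvRect g H W → 0 ≤ x → x < W → n ≤ H →
    pvRect ((PySem.List.pyRange 0 (n : Int) 1).foldl (fun g y => pvSet g y x 6) g) H W ∧
    ∀ r c : Nat, r < H → c < W →
      pvCell ((PySem.List.pyRange 0 (n : Int) 1).foldl (fun g y => pvSet g y x 6) g) r c =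
        if (c : Int) = x ∧ r < n then 6 else pvCell g r c := by
  intro n
  induction n with
  | zero =>
    intro g x hg hx0 hxW _
    rw [show ((0 : Nat) : Int) = 0 by norm_num, PySem.List.pyRange_one_eq_nil (by omega)]
    exact ⟨hg, fun r c hr hc => by rw [if_neg (by omega)]; rfl⟩
  | succ n ih =>
    intro g x hg hx0 hxW hnH
    obtain ⟨hrect, hcell⟩ := ih g x hg hx0 hxW (by omega)
    have hsplit : PySem.List.pyRange 0 ((n + 1 : Nat) : Int) 1 =
        PySem.List.pyRange 0 (n : Int) 1 ++ [(n : Int)] := by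
      rw [show ((n + 1 : Nat) : Int) = (n : Int) + 1 by push_cast; ring]
      exact PySem.List.pyRange_one_succ_right (by positivity)
    rw [hsplit, List.foldl_append]
    simp only [List.foldl_cons, List.foldl_nil]
    refine ⟨pvRect_pvSet hrect 6 (by positivity) (by omega) hx0, ?_⟩
    intro r c hr hc
    rw [pvCell_pvSet hrect 6 ⟨by positivity, by omega⟩ ⟨hx0, hxW⟩ hc,
      hcell r c hr hc]
    split_ifs <;> omega

theorem pvVFill_char {H W : Nat} : ∀ (vl : List Int) (g : List (List Int)),
    pvRect g H W → (∀ v ∈ vl, 0 ≤ v ∧ v < W) →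
    pvRect (vl.foldl (fun g x => (PySem.List.pyRange 0 (H : Int) 1).foldl (fun g y => pvSet g y x 6) g) g) H W ∧
    ∀ r c : Nat, r < H → c < W →
      pvCell (vl.foldl (fun g x => (PySem.List.pyRange 0 (H : Int) 1).foldl (fun g y => pvSet g y x 6) g) g) r c =
        if (c : Int) ∈ vl then 6 else pvCell g r c := by
  intro vl
  induction vl with
  | nil =>
    intro g hg _
    exact ⟨hg, fun r c hr hc => by rw [if_neg List.not_mem_nil]; rfl⟩
  | cons v vl ih =>
    intro g hg hbnd
    have hv := hbnd v List.mem_cons_self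
    obtain ⟨hrect1, hcell1⟩ := pvColFill_char H g v hg hv.1 hv.2 le_rfl
    obtain ⟨hrect, hcell⟩ := ih _ hrect1 (fun v' hv' => hbnd v' (List.mem_cons_of_mem _ hv'))
    refine ⟨hrect, ?_⟩
    intro r c hr hc
    rw [List.foldl_cons, hcell r c hr hc, hcell1 r c hr hc]
    by_cases h1 : (c : Int) ∈ vl
    · rw [if_pos h1, if_pos (List.mem_cons_of_mem _ h1)]
    · rw [if_neg h1]
      by_cases h2 : (c : Int) = v
      · rw [if_pos ⟨h2, hr⟩, if_pos (by rw [h2]; exact List.mem_cons_self)]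
      · rw [if_neg (by tauto), if_neg (by rw [List.mem_cons]; tauto)]

theorem pvHead_eq (l : List (List Int)) : PySem.List.pyGetD l 0 [] = l.headD [] := by
  rw [PySem.List.pyGetD_zero]
  cases l <;> rfl

theorem pvBGrid_char (input : List (List Int)) {H W : Nat}
    (hl vl : List Int) :
    pvRect ((PySem.List.pyRange 0 (H : Int) 1).map (fun y =>
      if y ∈ hl then List.replicate ((W : Int)).toNat 6
      else (PySem.List.pyRange 0 (W : Int) 1).map (fun x => if x ∈ vl then 6 else pvGet input y x))) H W ∧
    ∀ r c : Nat, r < H → c < W →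
      pvCell ((PySem.List.pyRange 0 (H : Int) 1).map (fun y =>
        if y ∈ hl then List.replicate ((W : Int)).toNat 6
        else (PySem.List.pyRange 0 (W : Int) 1).map (fun x => if x ∈ vl then 6 else pvGet input y x))) r c =
        if (r : Int) ∈ hl then 6 else if (c : Int) ∈ vl then 6 else pvCell input r c := by
  constructor
  · constructor
    · rw [List.length_map, PySem.List.length_pyRange_one]; omega
    · intro row hrow
      obtain ⟨y, hy, rfl⟩ := List.mem_map.mp hrow
      split_ifs
      · simp
      · rw [List.length_map, PySem.List.length_pyRange_one]; omega
  · intro r c hr hc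
    have hrow : ((PySem.List.pyRange 0 (H : Int) 1).map (fun y =>
        if y ∈ hl then List.replicate ((W : Int)).toNat 6
        else (PySem.List.pyRange 0 (W : Int) 1).map (fun x => if x ∈ vl then 6 else pvGet input y x))).getD r [] =
        (if (r : Int) ∈ hl then List.replicate ((W : Int)).toNat 6
         else (PySem.List.pyRange 0 (W : Int) 1).map (fun x => if x ∈ vl then 6 else pvGet input ((r : Int)) x)) := by
      rw [List.getD_eq_getElem?_getD, List.getElem?_map, PySem.List.getElem?_pyRange_one,
        if_pos (by omega)]
      simp
    rw [pvCell, hrow]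
    by_cases h1 : (r : Int) ∈ hl
    · rw [if_pos h1, if_pos h1, List.getD_replicate _ (by omega)]
    · rw [if_neg h1, if_neg h1, List.getD_eq_getElem?_getD, List.getElem?_map,
        PySem.List.getElem?_pyRange_one, if_pos (by omega)]
      simp only [Option.map_some, Option.getD_some, Int.zero_add]
      rw [pvGet_natCast]

theorem pvTB_bounds : ∀ (hs : List Int) (y : Int) (tb : Int × Int),
    tb.1 ≤ (pvTB y hs tb).1 ∧ (pvTB y hs tb).2 ≤ tb.2 := by
  intro hs
  induction hs with
  | nil => intro y tb; exact ⟨le_refl _, le_refl _⟩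
  | cons h hs ih =>
    intro y tb
    show tb.1 ≤ (pvTB y hs (if h < y then _ else _)).1 ∧ (pvTB y hs (if h < y then _ else _)).2 ≤ tb.2
    split_ifs with hhy
    · have := ih y (max tb.1 (h + 1), tb.2)
      constructor
      · exact le_trans (by simp) this.1
      · exact this.2
    · have := ih y (tb.1, min tb.2 (h - 1))
      constructor
      · exact this.1
      · exact le_trans this.2 (by simp)

theorem pvPhase4_eq (L : List (Int × Int)) (Q : Prop) [Decidable Q]
    (p : Int × Int → Prop) [DecidablePred p] (a g : List (List Int)) :
    (if Q then
      (if (L.foldl (fun flag d => if p d then true else flag) false) = true then a else g)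
     else g) =
    (if Q ∧ (L.any (fun d => decide (p d))) = true then a else g) := by
  have hfun : (fun (flag : Bool) (d : Int × Int) => if p d then true else flag) =
      (fun (flag : Bool) (d : Int × Int) => if (fun d => decide (p d)) d = true then true else flag) := by
    funext flag d
    split_ifs with h1 h2 h2 <;> simp_all
  rw [hfun, PySem.List.foldl_if_true_eq, Bool.false_or]
  split_ifs with h1 h2 h3 <;> tauto

theorem pvCover_iff (input : List (List Int)) (H W : Nat)
    (hl vl : List Int) (X : List Int) (Y : List (Int × Int))
    (hlsort : hl.Pairwise (· ≤ ·)) (hlbnd : ∀ h ∈ hl, 0 ≤ h ∧ h ≤ (H : Int) - 1)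
    (vlsort : vl.Pairwise (· ≤ ·)) (vlbnd : ∀ v ∈ vl, 0 ≤ v ∧ v ≤ (W : Int) - 1)
    (hY : ∀ p : Int × Int, p ∈ Y ↔
      0 ≤ p.2 ∧ p.2 < (H : Int) ∧ 0 ≤ p.1 ∧ p.1 < (W : Int) ∧ pvGet input p.2 p.1 = 4)
    (hX : ∀ x : Int, x ∈ X ↔ ∃ p ∈ Y, p.1 = x)
    (r c : Nat) :
    (∃ j ∈ X.flatMap (fun x => (pvBands 0 hl ((H : Int) - 1)).flatMap (fun tb =>
        ((pvBands 0 vl ((W : Int) - 1)).filter (fun lr =>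
          (PySem.List.pyRange tb.1 (tb.2 + 1) 1).any (fun y =>
            decide (lr.1 ≤ x ∧ x ≤ lr.2 ∧ pvGet input y x = 4)))).map (fun _ => (x, tb.1, tb.2)))),
      (c : Int) = j.1 ∧ j.2.1 ≤ (r : Int) ∧ (r : Int) ≤ j.2.2) ↔
    (∃ j ∈ (Y.filter (fun p => decide (¬(p.1 ∈ vl ∨ p.2 ∈ hl)))).map (fun p =>
        (p.1, (pvTB p.2 hl (0, (H : Int) - 1)).1, (pvTB p.2 hl (0, (H : Int) - 1)).2)),
      (c : Int) = j.1 ∧ j.2.1 ≤ (r : Int) ∧ (r : Int) ≤ j.2.2) := by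
  have hlbnd' : ∀ h ∈ hl, (0 : Int) ≤ h + 1 ∧ h - 1 ≤ (H : Int) - 1 :=
    fun h hh => ⟨by have := hlbnd h hh; omega, by have := hlbnd h hh; omega⟩
  have vlbnd' : ∀ v ∈ vl, (0 : Int) ≤ v + 1 ∧ v - 1 ≤ (W : Int) - 1 :=
    fun v hv => ⟨by have := vlbnd v hv; omega, by have := vlbnd v hv; omega⟩
  constructor
  · rintro ⟨j, hj, hcx, hrt, hrb⟩
    obtain ⟨x, hxX, hj2⟩ := List.mem_flatMap.mp hj
    obtain ⟨tb, htb, hj3⟩ := List.mem_flatMap.mp hj2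
    obtain ⟨lr, hlr', rfl⟩ := List.mem_map.mp hj3
    obtain ⟨hlr, hany⟩ := List.mem_filter.mp hlr'
    obtain ⟨yv, hyv, hyprop⟩ := List.any_eq_true.mp hany
    obtain ⟨hl1, hl2, hl3⟩ := of_decide_eq_true hyprop
    have hyrange := PySem.List.mem_pyRange_one.mp hyv
    simp only at hcx hrt hrb
    -- the yellow pixel (x, yv)
    have hmemY : (x, yv) ∈ Y := by
      rw [hY]
      have h1 := pvBands_fst_le hl 0 ((H : Int) - 1) hlsort (fun h hh => (hlbnd' h hh).1) tb htb
      have h2 := pvBands_snd_le hl 0 ((H : Int) - 1) (fun h hh => (hlbnd' h hh).2) tb htb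
      have h3 := pvBands_fst_le vl 0 ((W : Int) - 1) vlsort (fun v hv => (vlbnd' v hv).1) lr hlr
      have h4 := pvBands_snd_le vl 0 ((W : Int) - 1) (fun v hv => (vlbnd' v hv).2) lr hlr
      exact ⟨by omega, by omega, by omega, by omega, hl3⟩
    have hxvl : x ∉ vl := fun hx =>
      pvBands_not_cover vl 0 ((W : Int) - 1) x vlsort hx lr hlr ⟨hl1, hl2⟩
    have hyhl : yv ∉ hl := fun hy =>
      pvBands_not_cover hl 0 ((H : Int) - 1) yv hlsort hy tb htb ⟨by omega, by omega⟩
    have hmemY' := (hY (x, yv)).mp hmemY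
    simp only at hmemY'
    have hband := pvBand_main hl 0 ((H : Int) - 1) yv hlsort hlbnd' (by omega) (by omega) hyhl
    refine ⟨((x, yv).1, (pvTB (x, yv).2 hl (0, (H : Int) - 1)).1,
      (pvTB (x, yv).2 hl (0, (H : Int) - 1)).2), ?_, ?_⟩
    · apply List.mem_map_of_mem
      rw [List.mem_filter]
      exact ⟨hmemY, decide_eq_true (not_or.mpr ⟨hxvl, hyhl⟩)⟩
    · refine ⟨hcx, ?_⟩
      have := (hband.2.2 (r : Int)).mp ⟨tb, htb, by omega, by omega, hrt, hrb⟩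
      exact this
  · rintro ⟨j, hj, hcx, hrt, hrb⟩
    obtain ⟨p, hp', rfl⟩ := List.mem_map.mp hj
    obtain ⟨hpY, hpskip⟩ := List.mem_filter.mp hp'
    have hskip := of_decide_eq_true hpskip
    obtain ⟨hxvl, hyhl⟩ := not_or.mp hskip
    have hpprop := (hY p).mp hpY
    simp only at hcx hrt hrb
    have hband := pvBand_main hl 0 ((H : Int) - 1) p.2 hlsort hlbnd'
      (by omega) (by omega) hyhl
    obtain ⟨tb, htb, hty, hyb, htr, hrb2⟩ := (hband.2.2 (r : Int)).mpr ⟨hrt, hrb⟩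
    have hvband := pvBand_main vl 0 ((W : Int) - 1) p.1 vlsort vlbnd'
      (by omega) (by omega) hxvl
    obtain ⟨lr, hlr, hlx1, hlx2, -, -⟩ := (hvband.2.2 p.1).mpr ⟨hvband.1, hvband.2.1⟩
    refine ⟨(p.1, tb.1, tb.2), ?_, hcx, htr, hrb2⟩
    apply List.mem_flatMap.mpr
    refine ⟨p.1, (hX p.1).mpr ⟨p, hpY, rfl⟩, ?_⟩
    apply List.mem_flatMap.mpr
    refine ⟨tb, htb, ?_⟩
    apply List.mem_map.mpr
    refine ⟨lr, ?_, rfl⟩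
    rw [List.mem_filter]
    refine ⟨hlr, ?_⟩
    apply List.any_eq_true.mpr
    refine ⟨p.2, PySem.List.mem_pyRange_one.mpr ⟨hty, by omega⟩, ?_⟩
    exact decide_eq_true ⟨hlx1, hlx2, hpprop.2.2.2.2⟩

theorem pvPhase3A_body (input : List (List Int)) (hl vl : List Int) (Hh Wh : Int) (x : Int)
    (g : List (List Int)) :
    (PySem.List.pyRange 0 (PySem.List.len hl + 1) 1).foldl (fun g i =>
      (PySem.List.pyRange 0 (PySem.List.len vl + 1) 1).foldl (fun g j =>
        if ((PySem.List.pyRange (if i = 0 then 0 else PySem.List.pyGetD hl (i - 1) 0 + 1)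
              ((if i = PySem.List.len hl then Hh - 1 else PySem.List.pyGetD hl i 0 - 1) + 1) 1).any
            (fun y => decide ((if j = 0 then 0 else PySem.List.pyGetD vl (j - 1) 0 + 1) ≤ x ∧
              x ≤ (if j = PySem.List.len vl then Wh - 1 else PySem.List.pyGetD vl j 0 - 1) ∧
              pvGet input y x = 4))) = true
        then pvFill g x (if i = 0 then 0 else PySem.List.pyGetD hl (i - 1) 0 + 1)
              (if i = PySem.List.len hl then Hh - 1 else PySem.List.pyGetD hl i 0 - 1)
        else g) g) g
    = pvJobs g ((pvBands 0 hl (Hh - 1)).flatMap (fun tb =>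
        ((pvBands 0 vl (Wh - 1)).filter (fun lr =>
          (PySem.List.pyRange tb.1 (tb.2 + 1) 1).any (fun y =>
            decide (lr.1 ≤ x ∧ x ≤ lr.2 ∧ pvGet input y x = 4)))).map (fun _ => (x, tb.1, tb.2)))) := by
  have hinner : ∀ (tb : Int × Int) (g : List (List Int)),
      (PySem.List.pyRange 0 (PySem.List.len vl + 1) 1).foldl (fun g j =>
        if ((PySem.List.pyRange tb.1 (tb.2 + 1) 1).any
            (fun y => decide ((if j = 0 then 0 else PySem.List.pyGetD vl (j - 1) 0 + 1) ≤ x ∧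
              x ≤ (if j = PySem.List.len vl then Wh - 1 else PySem.List.pyGetD vl j 0 - 1) ∧
              pvGet input y x = 4))) = true
        then pvFill g x tb.1 tb.2 else g) g
      = pvJobs g (((pvBands 0 vl (Wh - 1)).filter (fun lr =>
          (PySem.List.pyRange tb.1 (tb.2 + 1) 1).any (fun y =>
            decide (lr.1 ≤ x ∧ x ≤ lr.2 ∧ pvGet input y x = 4)))).map (fun _ => (x, tb.1, tb.2))) := by
    intro tb g
    have h1 : (fun (g : List (List Int)) (j : Int) =>
        if ((PySem.List.pyRange tb.1 (tb.2 + 1) 1).any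
            (fun y => decide ((if j = 0 then 0 else PySem.List.pyGetD vl (j - 1) 0 + 1) ≤ x ∧
              x ≤ (if j = PySem.List.len vl then Wh - 1 else PySem.List.pyGetD vl j 0 - 1) ∧
              pvGet input y x = 4))) = true
        then pvFill g x tb.1 tb.2 else g) =
        (fun (g : List (List Int)) (j : Int) =>
          (fun (g : List (List Int)) (lr : Int × Int) =>
            if ((PySem.List.pyRange tb.1 (tb.2 + 1) 1).any
                (fun y => decide (lr.1 ≤ x ∧ x ≤ lr.2 ∧ pvGet input y x = 4))) = true
            then pvFill g x tb.1 tb.2 else g) g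
          ((fun j => ((if j = 0 then 0 else PySem.List.pyGetD vl (j - 1) 0 + 1 : Int),
            (if j = PySem.List.len vl then Wh - 1 else PySem.List.pyGetD vl j 0 - 1 : Int))) j)) := by
      funext g j
      rfl
    rw [h1, ← List.foldl_map
      (f := fun j => ((if j = 0 then 0 else PySem.List.pyGetD vl (j - 1) 0 + 1 : Int),
        (if j = PySem.List.len vl then Wh - 1 else PySem.List.pyGetD vl j 0 - 1 : Int)))
      (g := fun (g : List (List Int)) (lr : Int × Int) =>
        if ((PySem.List.pyRange tb.1 (tb.2 + 1) 1).any
            (fun y => decide (lr.1 ≤ x ∧ x ≤ lr.2 ∧ pvGet input y x = 4))) = true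
        then pvFill g x tb.1 tb.2 else g),
      pvRangeBands vl 0 (Wh - 1)]
    rw [PySem.List.foldl_ite_eq_foldl_filter
      (p := fun lr : Int × Int => ((PySem.List.pyRange tb.1 (tb.2 + 1) 1).any
        (fun y => decide (lr.1 ≤ x ∧ x ≤ lr.2 ∧ pvGet input y x = 4))) = true)
      (f := fun (g : List (List Int)) (_ : Int × Int) => pvFill g x tb.1 tb.2)]
    have h2 : (fun (lr : Int × Int) => decide (((PySem.List.pyRange tb.1 (tb.2 + 1) 1).any
        (fun y => decide (lr.1 ≤ x ∧ x ≤ lr.2 ∧ pvGet input y x = 4))) = true)) =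
        (fun (lr : Int × Int) => ((PySem.List.pyRange tb.1 (tb.2 + 1) 1).any
          (fun y => decide (lr.1 ≤ x ∧ x ≤ lr.2 ∧ pvGet input y x = 4)))) := by
      funext lr
      simp
    rw [h2]
    have h3 : (fun (g : List (List Int)) (_ : Int × Int) => pvFill g x tb.1 tb.2) =
        (fun (g : List (List Int)) (lr : Int × Int) =>
          (fun (g : List (List Int)) (j : Int × Int × Int) => pvFill g j.1 j.2.1 j.2.2) g
          ((fun (_ : Int × Int) => ((x, tb.1, tb.2) : Int × Int × Int)) lr)) := by
      funext g lr
      rfl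
    rw [h3, ← List.foldl_map
      (f := fun (_ : Int × Int) => ((x, tb.1, tb.2) : Int × Int × Int))
      (g := fun (g : List (List Int)) (j : Int × Int × Int) => pvFill g j.1 j.2.1 j.2.2)]
    rfl
  have h0 : (fun (g : List (List Int)) (i : Int) =>
      (PySem.List.pyRange 0 (PySem.List.len vl + 1) 1).foldl (fun g j =>
        if ((PySem.List.pyRange (if i = 0 then 0 else PySem.List.pyGetD hl (i - 1) 0 + 1)
              ((if i = PySem.List.len hl then Hh - 1 else PySem.List.pyGetD hl i 0 - 1) + 1) 1).any
            (fun y => decide ((if j = 0 then 0 else PySem.List.pyGetD vl (j - 1) 0 + 1) ≤ x ∧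
              x ≤ (if j = PySem.List.len vl then Wh - 1 else PySem.List.pyGetD vl j 0 - 1) ∧
              pvGet input y x = 4))) = true
        then pvFill g x (if i = 0 then 0 else PySem.List.pyGetD hl (i - 1) 0 + 1)
              (if i = PySem.List.len hl then Hh - 1 else PySem.List.pyGetD hl i 0 - 1)
        else g) g) =
      (fun (g : List (List Int)) (i : Int) =>
        (fun (g : List (List Int)) (tb : Int × Int) =>
          (PySem.List.pyRange 0 (PySem.List.len vl + 1) 1).foldl (fun g j =>
            if ((PySem.List.pyRange tb.1 (tb.2 + 1) 1).any
                (fun y => decide ((if j = 0 then 0 else PySem.List.pyGetD vl (j - 1) 0 + 1) ≤ x ∧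
                  x ≤ (if j = PySem.List.len vl then Wh - 1 else PySem.List.pyGetD vl j 0 - 1) ∧
                  pvGet input y x = 4))) = true
            then pvFill g x tb.1 tb.2 else g) g) g
        ((fun i => ((if i = 0 then 0 else PySem.List.pyGetD hl (i - 1) 0 + 1 : Int),
          (if i = PySem.List.len hl then Hh - 1 else PySem.List.pyGetD hl i 0 - 1 : Int))) i)) := by
    funext g i
    rfl
  rw [h0, ← List.foldl_map
    (f := fun i => ((if i = 0 then 0 else PySem.List.pyGetD hl (i - 1) 0 + 1 : Int),
      (if i = PySem.List.len hl then Hh - 1 else PySem.List.pyGetD hl i 0 - 1 : Int)))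
    (g := fun (g : List (List Int)) (tb : Int × Int) =>
      (PySem.List.pyRange 0 (PySem.List.len vl + 1) 1).foldl (fun g j =>
        if ((PySem.List.pyRange tb.1 (tb.2 + 1) 1).any
            (fun y => decide ((if j = 0 then 0 else PySem.List.pyGetD vl (j - 1) 0 + 1) ≤ x ∧
              x ≤ (if j = PySem.List.len vl then Wh - 1 else PySem.List.pyGetD vl j 0 - 1) ∧
              pvGet input y x = 4))) = true
        then pvFill g x tb.1 tb.2 else g) g),
    pvRangeBands hl 0 (Hh - 1)]
  have h4 : ∀ (gs : List (List Int)),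
      (pvBands 0 hl (Hh - 1)).foldl (fun (g : List (List Int)) (tb : Int × Int) =>
        (PySem.List.pyRange 0 (PySem.List.len vl + 1) 1).foldl (fun g j =>
          if ((PySem.List.pyRange tb.1 (tb.2 + 1) 1).any
              (fun y => decide ((if j = 0 then 0 else PySem.List.pyGetD vl (j - 1) 0 + 1) ≤ x ∧
                x ≤ (if j = PySem.List.len vl then Wh - 1 else PySem.List.pyGetD vl j 0 - 1) ∧
                pvGet input y x = 4))) = true
          then pvFill g x tb.1 tb.2 else g) g) gs =
      (pvBands 0 hl (Hh - 1)).foldl (fun (g : List (List Int)) (tb : Int × Int) =>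
        pvJobs g (((pvBands 0 vl (Wh - 1)).filter (fun lr =>
          (PySem.List.pyRange tb.1 (tb.2 + 1) 1).any (fun y =>
            decide (lr.1 ≤ x ∧ x ≤ lr.2 ∧ pvGet input y x = 4)))).map (fun _ => (x, tb.1, tb.2)))) gs := by
    intro gs
    exact PySem.List.foldl_congr_mem _ _ _ _ (fun acc tb _ => hinner tb acc)
  rw [h4, foldl_pvJobs_flat]

theorem pvPhase3B_body (hl vl : List Int) (Hh : Int) (Y : List (Int × Int))
    (g : List (List Int)) :
    Y.foldl (fun g p =>
      if p.1 ∈ vl ∨ p.2 ∈ hl then g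
      else pvFill g p.1
        (hl.foldl (fun tb h => if h < p.2 then (max tb.1 (h + 1), tb.2) else (tb.1, min tb.2 (h - 1)))
          ((0 : Int), Hh - 1)).1
        (hl.foldl (fun tb h => if h < p.2 then (max tb.1 (h + 1), tb.2) else (tb.1, min tb.2 (h - 1)))
          ((0 : Int), Hh - 1)).2) g
    = pvJobs g ((Y.filter (fun p => decide (¬(p.1 ∈ vl ∨ p.2 ∈ hl)))).map (fun p =>
        (p.1, (pvTB p.2 hl (0, Hh - 1)).1, (pvTB p.2 hl (0, Hh - 1)).2))) := by
  have h1 : (fun (g : List (List Int)) (p : Int × Int) =>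
      if p.1 ∈ vl ∨ p.2 ∈ hl then g
      else pvFill g p.1
        (hl.foldl (fun tb h => if h < p.2 then (max tb.1 (h + 1), tb.2) else (tb.1, min tb.2 (h - 1)))
          ((0 : Int), Hh - 1)).1
        (hl.foldl (fun tb h => if h < p.2 then (max tb.1 (h + 1), tb.2) else (tb.1, min tb.2 (h - 1)))
          ((0 : Int), Hh - 1)).2) =
      (fun (g : List (List Int)) (p : Int × Int) =>
        if ¬(p.1 ∈ vl ∨ p.2 ∈ hl) then
          pvFill g p.1 (pvTB p.2 hl (0, Hh - 1)).1 (pvTB p.2 hl (0, Hh - 1)).2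
        else g) := by
    funext g p
    rw [ite_not]
    rfl
  rw [h1, PySem.List.foldl_ite_eq_foldl_filter
    (p := fun p : Int × Int => ¬(p.1 ∈ vl ∨ p.2 ∈ hl))
    (f := fun (g : List (List Int)) (p : Int × Int) =>
      pvFill g p.1 (pvTB p.2 hl (0, Hh - 1)).1 (pvTB p.2 hl (0, Hh - 1)).2)]
  have h2 : (fun (g : List (List Int)) (p : Int × Int) =>
      pvFill g p.1 (pvTB p.2 hl (0, Hh - 1)).1 (pvTB p.2 hl (0, Hh - 1)).2) =
      (fun (g : List (List Int)) (p : Int × Int) =>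
        (fun (g : List (List Int)) (j : Int × Int × Int) => pvFill g j.1 j.2.1 j.2.2) g
        ((fun p : Int × Int =>
          ((p.1, (pvTB p.2 hl (0, Hh - 1)).1, (pvTB p.2 hl (0, Hh - 1)).2) : Int × Int × Int)) p)) := by
    funext g p
    rfl
  rw [h2, ← List.foldl_map
    (f := fun p : Int × Int =>
      ((p.1, (pvTB p.2 hl (0, Hh - 1)).1, (pvTB p.2 hl (0, Hh - 1)).2) : Int × Int × Int))
    (g := fun (g : List (List Int)) (j : Int × Int × Int) => pvFill g j.1 j.2.1 j.2.2)]
  rfl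


theorem main_equiv (input_grid : List (List Int)) (learned_rules : Option (List Int))
    (hpre : Pre_apply_solution input_grid learned_rules) :
    apply_solution input_grid learned_rules = apply_solution_alt input_grid learned_rules := by
  obtain ⟨hne, hw1, hrect0⟩ := hpre
  have hrect : pvRect input_grid input_grid.length (input_grid.headD []).length := ⟨rfl, hrect0⟩
  have hH1 : 1 ≤ input_grid.length := List.length_pos_iff.mpr hne
  simp only [apply_solution, apply_solution_alt]
  rw [show PySem.List.len input_grid = ((input_grid.length : Nat) : Int) from PySem.List.len_eq _,
    show PySem.List.len (PySem.List.pyGetD input_grid 0 []) =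
      (((input_grid.headD []).length : Nat) : Int) by rw [pvHead_eq, PySem.List.len_eq],
    show List.map (fun row => PySem.List.slice row none none) input_grid = input_grid by
      simp [PySem.List.slice_none_none]]
  simp only [PySem.List.foldl_append_if_eq_filter, PySem.List.foldl_append_ite,
    PySem.List.foldl_append_eq_flatMap, List.nil_append]
  have hhl : (PySem.List.pyRange 0 ((input_grid.length : Nat) : Int) 1).filter
      (fun y => (PySem.List.pyGetD input_grid y []).contains 6) =
      (PySem.List.pyRange 0 ((input_grid.length : Nat) : Int) 1).filter
      (fun y => (PySem.List.pyRange 0 (((input_grid.headD []).length : Nat) : Int) 1).any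
        (fun x => decide (pvGet input_grid y x = 6))) := by
    apply List.filter_congr
    intro y hy
    obtain ⟨hy0, hyH⟩ := PySem.List.mem_pyRange_one.mp hy
    rw [PySem.List.pyGetD_of_nonneg _ _ hy0]
    have hyl : y.toNat < input_grid.length := by omega
    have hlenrow : (input_grid.getD y.toNat []).length = (input_grid.headD []).length := by
      rw [List.getD_eq_getElem _ _ hyl]
      exact hrect0 _ (List.getElem_mem hyl)
    rw [Bool.eq_iff_iff]
    constructor
    · intro hcont
      have h6 : (6 : Int) ∈ input_grid.getD y.toNat [] := by simpa using hcont
      obtain ⟨i, hi, hgi⟩ := List.mem_iff_getElem.mp h6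
      apply List.any_eq_true.mpr
      refine ⟨(i : Int), PySem.List.mem_pyRange_one.mpr ⟨by positivity, by omega⟩, ?_⟩
      apply decide_eq_true
      rw [pvGet, PySem.List.pyGetD_of_nonneg _ _ hy0, PySem.List.pyGetD_natCast,
        List.getD_eq_getElem _ _ (by omega)]
      exact hgi
    · intro hany
      obtain ⟨xv, hxv, hx6⟩ := List.any_eq_true.mp hany
      obtain ⟨hx0, hxW⟩ := PySem.List.mem_pyRange_one.mp hxv
      have hxval := of_decide_eq_true hx6
      rw [pvGet, PySem.List.pyGetD_of_nonneg _ _ hy0,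
        PySem.List.pyGetD_of_nonneg _ _ hx0] at hxval
      have hmem6 : (6 : Int) ∈ input_grid.getD y.toNat [] := by
        rw [← hxval]
        have hxl : xv.toNat < (input_grid.getD y.toNat []).length := by omega
        rw [List.getD_eq_getElem _ _ hxl]
        exact List.getElem_mem hxl
      simpa using hmem6
  have hvl : (PySem.List.pyRange 0 (((input_grid.headD []).length : Nat) : Int) 1).filter
      (fun x => ((PySem.List.pyRange 0 ((input_grid.length : Nat) : Int) 1).map
        (fun y => pvGet input_grid y x)).contains 6) =
      (PySem.List.pyRange 0 (((input_grid.headD []).length : Nat) : Int) 1).filter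
      (fun x => (PySem.List.pyRange 0 ((input_grid.length : Nat) : Int) 1).any
        (fun y => decide (pvGet input_grid y x = 6))) := by
    apply List.filter_congr
    intro x _
    rw [Bool.eq_iff_iff]
    constructor
    · intro hcont
      have h6 : (6 : Int) ∈ (PySem.List.pyRange 0 ((input_grid.length : Nat) : Int) 1).map
          (fun y => pvGet input_grid y x) := by simpa using hcont
      obtain ⟨y, hy, hgy⟩ := List.mem_map.mp h6
      exact List.any_eq_true.mpr ⟨y, hy, decide_eq_true hgy⟩
    · intro hany
      obtain ⟨y, hy, h⟩ := List.any_eq_true.mp hany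
      have h6 : (6 : Int) ∈ (PySem.List.pyRange 0 ((input_grid.length : Nat) : Int) 1).map
          (fun y => pvGet input_grid y x) :=
        List.mem_map.mpr ⟨y, hy, of_decide_eq_true h⟩
      simpa using h6
  rw [hhl, hvl]
  set hl0 : List Int := (PySem.List.pyRange 0 ((input_grid.length : Nat) : Int) 1).filter
      (fun y => (PySem.List.pyRange 0 (((input_grid.headD []).length : Nat) : Int) 1).any
        (fun x => decide (pvGet input_grid y x = 6))) with hl0_def
  set vl0 : List Int := (PySem.List.pyRange 0 (((input_grid.headD []).length : Nat) : Int) 1).filter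
      (fun x => (PySem.List.pyRange 0 ((input_grid.length : Nat) : Int) 1).any
        (fun y => decide (pvGet input_grid y x = 6))) with vl0_def
  set hl : List Int := if PySem.List.len hl0 < 2 then
      [PySem.Int.floordiv ((input_grid.length : Nat) : Int) 3,
        2 * PySem.Int.floordiv ((input_grid.length : Nat) : Int) 3] else hl0 with hl_def
  set vl : List Int := if PySem.List.len vl0 < 2 then
      [PySem.Int.floordiv (((input_grid.headD []).length : Nat) : Int) 3,
        2 * PySem.Int.floordiv (((input_grid.headD []).length : Nat) : Int) 3] else vl0 with vl_def
  set Y : List (Int × Int) := (PySem.List.pyRange 0 ((input_grid.length : Nat) : Int) 1).flatMap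
      (fun y => ((PySem.List.pyRange 0 (((input_grid.headD []).length : Nat) : Int) 1).filter
        (fun x => decide (pvGet input_grid y x = 4))).map (fun x => (x, y))) with Y_def
  set X : List Int := PySem.Set.ofList (Y.map (fun p => p.1)) with X_def
  have hfd : ∀ (n : Nat), 1 ≤ n → 0 ≤ PySem.Int.floordiv ((n : Nat) : Int) 3 ∧
      2 * PySem.Int.floordiv ((n : Nat) : Int) 3 ≤ ((n : Nat) : Int) - 1 := by
    intro n hn
    rw [PySem.Int.floordiv_eq_ediv_of_pos (by norm_num)]
    omega
  have hlsort : hl.Pairwise (· ≤ ·) := by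
    rw [hl_def]
    split_ifs
    · have := hfd input_grid.length hH1
      simp only [List.pairwise_cons, List.mem_singleton, List.Pairwise.nil, and_true,
        List.not_mem_nil, IsEmpty.forall_iff, implies_true, forall_eq]
      omega
    · rw [hl0_def]
      exact ((PySem.List.pairwise_lt_pyRange_one _ _).filter _).imp le_of_lt
  have hlbnd : ∀ h ∈ hl, 0 ≤ h ∧ h ≤ ((input_grid.length : Nat) : Int) - 1 := by
    intro h hh
    rw [hl_def] at hh
    split_ifs at hh
    · have := hfd input_grid.length hH1
      simp only [List.mem_cons, List.not_mem_nil, or_false] at hh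
      rcases hh with rfl | rfl <;> omega
    · rw [hl0_def] at hh
      have := PySem.List.mem_pyRange_one.mp (List.mem_of_mem_filter hh)
      omega
  have hvsort : vl.Pairwise (· ≤ ·) := by
    rw [vl_def]
    split_ifs
    · have := hfd (input_grid.headD []).length hw1
      simp only [List.pairwise_cons, List.mem_singleton, List.Pairwise.nil, and_true,
        List.not_mem_nil, IsEmpty.forall_iff, implies_true, forall_eq]
      omega
    · rw [vl0_def]
      exact ((PySem.List.pairwise_lt_pyRange_one _ _).filter _).imp le_of_lt
  have hvbnd : ∀ v ∈ vl, 0 ≤ v ∧ v ≤ (((input_grid.headD []).length : Nat) : Int) - 1 := by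
    intro v hv
    rw [vl_def] at hv
    split_ifs at hv
    · have := hfd (input_grid.headD []).length hw1
      simp only [List.mem_cons, List.not_mem_nil, or_false] at hv
      rcases hv with rfl | rfl <;> omega
    · rw [vl0_def] at hv
      have := PySem.List.mem_pyRange_one.mp (List.mem_of_mem_filter hv)
      omega
  have hbnd2h : ∀ h ∈ hl, 0 ≤ h ∧ h < ((input_grid.length : Nat) : Int) :=
    fun h hh => ⟨(hlbnd h hh).1, by have := (hlbnd h hh).2; omega⟩
  have hbnd2v : ∀ v ∈ vl, 0 ≤ v ∧ v < (((input_grid.headD []).length : Nat) : Int) :=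
    fun v hv => ⟨(hvbnd v hv).1, by have := (hvbnd v hv).2; omega⟩
  obtain ⟨hrect2a, hcell2a⟩ := pvHFill_char hl input_grid hrect hbnd2h
  obtain ⟨hrect2b, hcell2b⟩ := pvVFill_char vl _ hrect2a hbnd2v
  obtain ⟨hrect2c, hcell2c⟩ := pvBGrid_char input_grid (H := input_grid.length) (W := (input_grid.headD []).length) hl vl
  have hg2 : vl.foldl (fun g x =>
        (PySem.List.pyRange 0 ((input_grid.length : Nat) : Int) 1).foldl
          (fun g y => pvSet g y x 6) g)
      (hl.foldl (fun g y =>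
        (PySem.List.pyRange 0 (((input_grid.headD []).length : Nat) : Int) 1).foldl
          (fun g x => pvSet g y x 6) g) input_grid) =
      (PySem.List.pyRange 0 ((input_grid.length : Nat) : Int) 1).map (fun y =>
        if y ∈ hl then List.replicate ((((input_grid.headD []).length : Nat) : Int)).toNat 6
        else (PySem.List.pyRange 0 (((input_grid.headD []).length : Nat) : Int) 1).map
          (fun x => if x ∈ vl then 6 else pvGet input_grid y x)) := by
    apply pv_grid_ext hrect2b hrect2c
    intro r c hr hc
    rw [hcell2b r c hr hc, hcell2a r c hr hc, hcell2c r c hr hc]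
    split_ifs <;> rfl
  rw [hg2]
  set g2 : List (List Int) := (PySem.List.pyRange 0 ((input_grid.length : Nat) : Int) 1).map (fun y =>
      if y ∈ hl then List.replicate ((((input_grid.headD []).length : Nat) : Int)).toNat 6
      else (PySem.List.pyRange 0 (((input_grid.headD []).length : Nat) : Int) 1).map
        (fun x => if x ∈ vl then 6 else pvGet input_grid y x)) with g2_def
  have hYc : ∀ p : Int × Int, p ∈ Y ↔ 0 ≤ p.2 ∧ p.2 < ((input_grid.length : Nat) : Int) ∧
      0 ≤ p.1 ∧ p.1 < (((input_grid.headD []).length : Nat) : Int) ∧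
      pvGet input_grid p.2 p.1 = 4 := by
    intro p
    rw [Y_def, List.mem_flatMap]
    constructor
    · rintro ⟨y, hy, hp⟩
      obtain ⟨x, hx, rfl⟩ := List.mem_map.mp hp
      obtain ⟨hxr, hx4⟩ := List.mem_filter.mp hx
      obtain ⟨h1, h2⟩ := PySem.List.mem_pyRange_one.mp hy
      obtain ⟨h3, h4⟩ := PySem.List.mem_pyRange_one.mp hxr
      exact ⟨h1, h2, h3, h4, of_decide_eq_true hx4⟩
    · rintro ⟨h1, h2, h3, h4, h5⟩
      refine ⟨p.2, PySem.List.mem_pyRange_one.mpr ⟨h1, h2⟩, ?_⟩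
      apply List.mem_map.mpr
      exact ⟨p.1, List.mem_filter.mpr ⟨PySem.List.mem_pyRange_one.mpr ⟨h3, h4⟩,
        decide_eq_true h5⟩, rfl⟩
  have hXc : ∀ x : Int, x ∈ X ↔ ∃ p ∈ Y, p.1 = x := by
    intro x
    rw [X_def, PySem.Set.mem_ofList, List.mem_map]
  have hbodyA := funext (fun (g : List (List Int)) => funext (fun (x : Int) =>
    pvPhase3A_body input_grid hl vl ((input_grid.length : Nat) : Int)
      (((input_grid.headD []).length : Nat) : Int) x g))
  rw [hbodyA, foldl_pvJobs_flat X _ g2,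
    pvPhase3B_body hl vl ((input_grid.length : Nat) : Int) Y g2]
  have hg2rect : pvRect g2 input_grid.length (input_grid.headD []).length := hrect2c
  have hLAbnd : ∀ j ∈ X.flatMap (fun x =>
      (pvBands 0 hl (((input_grid.length : Nat) : Int) - 1)).flatMap (fun tb =>
        ((pvBands 0 vl ((((input_grid.headD []).length : Nat) : Int) - 1)).filter (fun lr =>
          (PySem.List.pyRange tb.1 (tb.2 + 1) 1).any (fun y =>
            decide (lr.1 ≤ x ∧ x ≤ lr.2 ∧ pvGet input_grid y x = 4)))).map
          (fun _ => (x, tb.1, tb.2)))),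
      0 ≤ j.1 ∧ j.1 < (((input_grid.headD []).length : Nat) : Int) ∧ 0 ≤ j.2.1 ∧
        j.2.2 < ((input_grid.length : Nat) : Int) := by
    intro j hj
    obtain ⟨x, hxX, hj2⟩ := List.mem_flatMap.mp hj
    obtain ⟨tb, htb, hj3⟩ := List.mem_flatMap.mp hj2
    obtain ⟨lr, hlr', rfl⟩ := List.mem_map.mp hj3
    obtain ⟨p, hpY, rfl⟩ := (hXc x).mp hxX
    have hp := (hYc p).mp hpY
    have h1 := pvBands_fst_le hl 0 (((input_grid.length : Nat) : Int) - 1) hlsort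
      (fun h hh => by have := hlbnd h hh; omega) tb htb
    have h2 := pvBands_snd_le hl 0 (((input_grid.length : Nat) : Int) - 1)
      (fun h hh => by have := hlbnd h hh; omega) tb htb
    exact ⟨hp.2.2.1, hp.2.2.2.1, h1, (by omega : tb.2 < ((input_grid.length : Nat) : Int))⟩
  have hLBbnd : ∀ j ∈ (Y.filter (fun p => decide (¬(p.1 ∈ vl ∨ p.2 ∈ hl)))).map (fun p =>
      (p.1, (pvTB p.2 hl (0, ((input_grid.length : Nat) : Int) - 1)).1,
        (pvTB p.2 hl (0, ((input_grid.length : Nat) : Int) - 1)).2)),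
      0 ≤ j.1 ∧ j.1 < (((input_grid.headD []).length : Nat) : Int) ∧ 0 ≤ j.2.1 ∧
        j.2.2 < ((input_grid.length : Nat) : Int) := by
    intro j hj
    obtain ⟨p, hp', rfl⟩ := List.mem_map.mp hj
    have hpY := (List.mem_filter.mp hp').1
    have hp := (hYc p).mp hpY
    have hb1 : (0 : Int) ≤ (pvTB p.2 hl (0, ((input_grid.length : Nat) : Int) - 1)).1 :=
      (pvTB_bounds hl p.2 (0, ((input_grid.length : Nat) : Int) - 1)).1
    have hb2 : (pvTB p.2 hl (0, ((input_grid.length : Nat) : Int) - 1)).2 ≤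
        ((input_grid.length : Nat) : Int) - 1 :=
      (pvTB_bounds hl p.2 (0, ((input_grid.length : Nat) : Int) - 1)).2
    exact ⟨hp.2.2.1, hp.2.2.2.1, hb1,
      (by omega : (pvTB p.2 hl (0, ((input_grid.length : Nat) : Int) - 1)).2 <
        ((input_grid.length : Nat) : Int))⟩
  obtain ⟨hrA, hcA⟩ := pvJobs_char _ g2 hg2rect hLAbnd
  obtain ⟨hrB, hcB⟩ := pvJobs_char _ g2 hg2rect hLBbnd
  have hjobs : pvJobs g2 (X.flatMap (fun x =>
      (pvBands 0 hl (((input_grid.length : Nat) : Int) - 1)).flatMap (fun tb =>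
        ((pvBands 0 vl ((((input_grid.headD []).length : Nat) : Int) - 1)).filter (fun lr =>
          (PySem.List.pyRange tb.1 (tb.2 + 1) 1).any (fun y =>
            decide (lr.1 ≤ x ∧ x ≤ lr.2 ∧ pvGet input_grid y x = 4)))).map
          (fun _ => (x, tb.1, tb.2))))) =
      pvJobs g2 ((Y.filter (fun p => decide (¬(p.1 ∈ vl ∨ p.2 ∈ hl)))).map (fun p =>
        (p.1, (pvTB p.2 hl (0, ((input_grid.length : Nat) : Int) - 1)).1,
          (pvTB p.2 hl (0, ((input_grid.length : Nat) : Int) - 1)).2))) := by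
    apply pv_grid_ext hrA hrB
    intro r c hr hc
    rw [hcA r c hr hc, hcB r c hr hc]
    have hcov := pvCover_iff input_grid input_grid.length (input_grid.headD []).length
      hl vl X Y hlsort hlbnd hvsort hvbnd hYc hXc r c
    simp only [hcov]
  rw [hjobs]
  have h4 : (fun (g : List (List Int)) (x : Int) => hl.foldl (fun g y =>
      if pvGet g y x = 6 then
        if ([((0 : Int), (-1 : Int)), (0, 1), (-1, 0), (1, 0)].foldl (fun flag d =>
            if 0 ≤ x + d.1 ∧ x + d.1 < (((input_grid.headD []).length : Nat) : Int) ∧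
              0 ≤ y + d.2 ∧ y + d.2 < ((input_grid.length : Nat) : Int) ∧
              pvGet g (y + d.2) (x + d.1) = 4
            then true else flag) false) = true
        then pvSet g y x 2 else g
      else g) g) =
      (fun (g : List (List Int)) (x : Int) => hl.foldl (fun g y =>
        if pvGet g y x = 6 ∧ ([((0 : Int), (-1 : Int)), (0, 1), (-1, 0), (1, 0)].any (fun d =>
            decide (0 ≤ x + d.1 ∧ x + d.1 < (((input_grid.headD []).length : Nat) : Int) ∧
              0 ≤ y + d.2 ∧ y + d.2 < ((input_grid.length : Nat) : Int) ∧
              pvGet g (y + d.2) (x + d.1) = 4))) = true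
        then pvSet g y x 2 else g) g) := by
    funext g x
    apply PySem.List.foldl_congr_mem
    intro acc y _
    exact pvPhase4_eq [((0 : Int), (-1 : Int)), (0, 1), (-1, 0), (1, 0)] _ _ _ acc
  rw [h4]

-- ===== VERDICT (by name: the statement is the Claim_ definition above) =====
theorem apply_solution_spec : Claim_equal_apply_solution := by
  intro input_grid learned_rules _ hpre
  exact main_equiv input_grid learned_rules hpre
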